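-- pv_equiv track=rewrite | github.com/Lucyell/AI-experiment | 归结原理/最一般合一算法.py | extract_innermost_paren_content
-- ===== SOURCE A (Python) =====
-- def extract_innermost_paren_content(expr):
--     stack = []
--     content = ""
--     max_depth = 0
--     current_depth = 0
--     start_idx = -1
--
--     for idx, char in enumerate(expr):
--         if char == '(':
--             current_depth += 1
--             stack.append(idx)
--             if current_depth > max_depth:
--                 max_depth = current_depth
--                 start_idx = idx
--         elif char == ')':
--             if stack:
--                 current_depth -= 1
--                 if current_depth == max_depth - 1:
--                     end_idx = idx
--                     content = expr[start_idx + 1:end_idx]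
--                 stack.pop()
--
--     return content if content else expr
-- ===== SOURCE B (Python) =====
-- def _first_reach(expr, target):
--     # index of the first '(' whose (clamped) depth after incrementing equals target
--     depth = 0
--     for i, c in enumerate(expr):
--         if c == '(':
--             depth += 1
--             if depth == target:
--                 return i
--         elif c == ')' and depth > 0:
--             depth -= 1
--     return -1
--
--
-- def extract_innermost_paren_content(expr):
--     # Pass 1: find the last ')' that closes back from the running maximum depth,
--     # remembering that depth.  Pass 2: find the matching first '(' and slice once.
--     depth = 0
--     run_max = 0
--     end_idx = -1
--     end_max = 0
--     for i, c in enumerate(expr):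
--         if c == '(':
--             depth += 1
--             if depth > run_max:
--                 run_max = depth
--         elif c == ')' and depth > 0:
--             if depth == run_max:
--                 end_idx = i
--                 end_max = run_max
--             depth -= 1
--     if end_idx < 0:
--         return expr
--     start_idx = _first_reach(expr, end_max)
--     content = expr[start_idx + 1:end_idx]
--     return content if content else expr
-- ===== Notes on version B (the rewrite author's own statement) =====
-- stated objective: alternative
-- what changed: A keeps a stack of indices and re-slices the string at every qualifying closing parenthesis in one online pass; B makes two index-only counting passes (last close from the running max depth, then first open reaching that depth) and performs a single slice at the end.
import Mathlib
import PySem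

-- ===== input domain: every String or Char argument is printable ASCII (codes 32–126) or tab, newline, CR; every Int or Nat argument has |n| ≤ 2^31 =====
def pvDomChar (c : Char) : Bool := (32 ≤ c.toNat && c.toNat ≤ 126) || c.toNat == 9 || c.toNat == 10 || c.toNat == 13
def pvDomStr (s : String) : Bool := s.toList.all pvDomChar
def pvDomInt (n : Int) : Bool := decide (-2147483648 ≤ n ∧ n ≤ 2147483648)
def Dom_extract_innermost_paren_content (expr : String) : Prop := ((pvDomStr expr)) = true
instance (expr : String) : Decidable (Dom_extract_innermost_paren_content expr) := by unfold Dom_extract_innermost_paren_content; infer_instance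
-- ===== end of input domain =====

-- B replaces A's stack + slice-on-every-qualifying-')' single pass by two index-only passes and ONE final slice.

-- ===== PORT A =====
-- loop body of A: state (stack, content, max_depth, current_depth, start_idx)
def stepA (full : List Char) (s : List Int × List Char × Int × Int × Int) (p : Int × Char) :
    List Int × List Char × Int × Int × Int :=
  match s, p with
  | (stack, content, md, cd, si), (idx, c) =>
    if c = '(' then
      let cd' := cd + 1
      let stack' := stack ++ [idx]
      if cd' > md then (stack', content, cd', cd', idx) else (stack', content, md, cd', si)
    else if c = ')' then
      if stack = [] then (stack, content, md, cd, si)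
      else
        let cd' := cd - 1
        let content' := if cd' = md - 1 then PySem.List.slice full (some (si + 1)) (some idx)
                        else content
        (stack.dropLast, content', md, cd', si)
    else (stack, content, md, cd, si)

def extract_innermost_paren_content (expr : String) : String :=
  let cs := expr.toList
  let r := (PySem.List.enumerate cs 0).foldl (stepA cs) ([], [], 0, 0, -1)
  if r.2.1 = [] then expr else String.ofList r.2.1

-- ===== PORT B =====
-- pass-1 body of B: state (depth, run_max, end_idx, end_max)
def stepB (s : Int × Int × Int × Int) (p : Int × Char) : Int × Int × Int × Int :=
  match s, p with
  | (depth, rm, ei, em), (i, c) =>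
    if c = '(' then
      let d := depth + 1
      if d > rm then (d, d, ei, em) else (d, rm, ei, em)
    else if c = ')' ∧ 0 < depth then
      if depth = rm then (depth - 1, rm, i, rm) else (depth - 1, rm, ei, em)
    else s

-- pass 2 of B (_first_reach in Source B): first '(' whose incremented depth hits target
def firstReach (es : List (Int × Char)) (depth target : Int) : Int :=
  match es with
  | [] => -1
  | (i, c) :: rest =>
    if c = '(' then
      if depth + 1 = target then i else firstReach rest (depth + 1) target
    else if c = ')' ∧ 0 < depth then firstReach rest (depth - 1) target
    else firstReach rest depth target

def extract_innermost_paren_content_alt (expr : String) : String :=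
  let cs := expr.toList
  let es := PySem.List.enumerate cs 0
  let r := es.foldl stepB (0, 0, -1, 0)
  if r.2.2.1 < 0 then expr
  else
    let content := PySem.List.slice cs (some (firstReach es 0 r.2.2.2 + 1)) (some r.2.2.1)
    if content = [] then expr else String.ofList content

-- ===== PRECONDITION & SPEC =====
def Spec_extract_innermost_paren_content (expr : String) (out : String) : Prop :=
  out = extract_innermost_paren_content_alt expr
instance (expr : String) (out : String) : Decidable (Spec_extract_innermost_paren_content expr out) := by
  unfold Spec_extract_innermost_paren_content; infer_instance

-- ===== CLAIM (what is proved, stated in full; the proofs are below) =====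
def Claim_equal_extract_innermost_paren_content : Prop :=
  ∀ (expr : String), Dom_extract_innermost_paren_content expr →
    Spec_extract_innermost_paren_content expr (extract_innermost_paren_content expr)

-- ===== LEMMAS AND PROOFS =====

-- running clamped depth (the depth both loops maintain)
def dstep (d : Int) (p : Int × Char) : Int :=
  if p.2 = '(' then d + 1 else if p.2 = ')' ∧ 0 < d then d - 1 else d

def dAfter (es : List (Int × Char)) (d : Int) : Int := es.foldl dstep d

theorem dAfter_append (e1 e2 : List (Int × Char)) (d : Int) :
    dAfter (e1 ++ e2) d = dAfter e2 (dAfter e1 d) := by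
  simp [dAfter, List.foldl_append]

theorem firstReach_append (e1 e2 : List (Int × Char)) (d t : Int) (hpos : ∀ p ∈ e1, 0 ≤ p.1) :
    firstReach (e1 ++ e2) d t =
      if firstReach e1 d t = -1 then firstReach e2 (dAfter e1 d) t else firstReach e1 d t := by
  induction e1 generalizing d with
  | nil => simp [firstReach, dAfter]
  | cons p rest ih =>
    obtain ⟨i, c⟩ := p
    have hi : 0 ≤ i := hpos (i, c) (by simp)
    have hrest : ∀ p ∈ rest, 0 ≤ p.1 := fun p hp => hpos p (by simp [hp])
    by_cases hc : c = '('
    · by_cases ht : d + 1 = t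
      · simp [firstReach, hc, ht]
        omega
      · simp [firstReach, hc, ht, ih _ hrest, dAfter, dstep, List.foldl_cons]
    · by_cases hc2 : c = ')' ∧ 0 < d
      · simp [firstReach, hc2, ih _ hrest, dAfter, dstep, List.foldl_cons]
      · simp only [List.cons_append, firstReach, hc, if_false, hc2, ih _ hrest]
        congr 2
        simp [dAfter, dstep, List.foldl_cons, hc, hc2]

-- the simulation relation between A's loop state and B's pass-1 state after a common prefix cs
def SimInv (full cs : List Char) (a : List Int × List Char × Int × Int × Int)
    (b : Int × Int × Int × Int) : Prop :=
  a.2.2.2.1 = b.1 ∧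
  a.1.length = b.1.toNat ∧
  0 ≤ b.1 ∧
  a.2.2.1 = b.2.1 ∧
  b.1 ≤ b.2.1 ∧
  b.1 = dAfter (PySem.List.enumerate cs 0) 0 ∧
  a.2.2.2.2 = firstReach (PySem.List.enumerate cs 0) 0 b.2.1 ∧
  (1 ≤ b.2.1 → firstReach (PySem.List.enumerate cs 0) 0 b.2.1 ≠ -1) ∧
  (∀ t, b.2.1 < t → firstReach (PySem.List.enumerate cs 0) 0 t = -1) ∧
  ((b.2.2.1 = -1 ∧ a.2.1 = []) ∨
   (0 ≤ b.2.2.1 ∧ 1 ≤ b.2.2.2 ∧ firstReach (PySem.List.enumerate cs 0) 0 b.2.2.2 ≠ -1 ∧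
    a.2.1 = PySem.List.slice full (some (firstReach (PySem.List.enumerate cs 0) 0 b.2.2.2 + 1))
              (some b.2.2.1)))

theorem main_inv (full cs : List Char) :
    SimInv full cs ((PySem.List.enumerate cs 0).foldl (stepA full) ([], [], 0, 0, -1))
      ((PySem.List.enumerate cs 0).foldl stepB (0, 0, -1, 0)) := by
  induction cs using List.reverseRecOn with
  | nil =>
    simp [SimInv, PySem.List.enumerate_nil, firstReach, dAfter]
  | append_singleton cs c ih =>
    have hpos : ∀ p ∈ PySem.List.enumerate cs 0, 0 ≤ p.1 := by
      intro p hp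
      rw [PySem.List.mem_enumerate_iff] at hp
      obtain ⟨k, hk, rfl⟩ := hp
      simp
    rcases hA : (PySem.List.enumerate cs 0).foldl (stepA full) ([], [], 0, 0, -1) with
      ⟨stack, content, md, cd, si⟩
    rcases hB : (PySem.List.enumerate cs 0).foldl stepB (0, 0, -1, 0) with ⟨depth, rm, ei, em⟩
    rw [hA, hB] at ih
    obtain ⟨h1, h2, h3, h4, h5, h6, h7, h8, h9, h10⟩ := ih
    simp only at h1 h2 h3 h4 h5 h6 h7 h8 h9 h10
    simp only [SimInv]
    rw [PySem.List.enumerate_append]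
    rw [show PySem.List.enumerate [c] ((0:Int) + cs.length) = [(((cs.length : Int)), c)] by
      simp [PySem.List.enumerate_cons, PySem.List.enumerate_nil]]
    rw [List.foldl_append, List.foldl_append, hA, hB]
    set n : Int := (cs.length : Int) with hn
    have hn0 : 0 ≤ n := by positivity
    have hfr : ∀ t, firstReach (PySem.List.enumerate cs 0 ++ [(n, c)]) 0 t =
        if firstReach (PySem.List.enumerate cs 0) 0 t = -1 then firstReach [(n, c)] depth t
        else firstReach (PySem.List.enumerate cs 0) 0 t := by
      intro t
      rw [firstReach_append _ _ _ _ hpos, ← h6]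
    have hda : dAfter (PySem.List.enumerate cs 0 ++ [(n, c)]) 0 = dstep depth (n, c) := by
      rw [dAfter_append, ← h6]; simp [dAfter]
    by_cases hc : c = '('
    · -- opening parenthesis
      subst hc
      have hsing1 : ∀ t, firstReach [(n, '(')] depth t = if depth + 1 = t then n else -1 := by
        intro t
        simp [firstReach]
      by_cases hle : rm ≤ depth
      · -- new maximal depth
        have hsA : List.foldl (stepA full) (stack, content, md, cd, si) [(n, '(')] =
            (stack ++ [n], content, depth + 1, depth + 1, n) := by
          simp [stepA, h1, h4, hle, show md < cd + 1 by omega]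
        have hsB : List.foldl stepB (depth, rm, ei, em) [(n, '(')] =
            (depth + 1, depth + 1, ei, em) := by
          simp [stepB, show rm < depth + 1 by omega]
        rw [hsA, hsB]
        have hfr1 : firstReach (PySem.List.enumerate cs 0 ++ [(n, '(')]) 0 (depth + 1) = n := by
          rw [hfr, if_pos (h9 _ (by omega)), hsing1, if_pos rfl]
        refine ⟨rfl, ?_, by simp only; omega, rfl, by simp only; omega, ?_, ?_, ?_, ?_, ?_⟩
        · simp only [List.length_append, List.length_cons, List.length_nil, h2]
          omega
        · simp only
          rw [hda]
          simp [dstep]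
        · simp only
          exact hfr1.symm
        · simp only
          intro _
          rw [hfr1]
          omega
        · intro t ht
          simp only at ht
          rw [hfr, if_pos (h9 _ (by omega)), hsing1, if_neg (by omega)]
        · simp only
          rcases h10 with ⟨he, hcont⟩ | ⟨he0, he1, he2, he3⟩
          · exact Or.inl ⟨he, hcont⟩
          · exact Or.inr ⟨he0, he1, by rw [hfr, if_neg he2]; exact he2,
              by rw [hfr, if_neg he2]; exact he3⟩
      · -- depth stays below the running maximum
        have hrm1 : 1 ≤ rm := by omega
        have hsA : List.foldl (stepA full) (stack, content, md, cd, si) [(n, '(')] =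
            (stack ++ [n], content, rm, depth + 1, si) := by
          simp [stepA, h1, h4, hle]
        have hsB : List.foldl stepB (depth, rm, ei, em) [(n, '(')] =
            (depth + 1, rm, ei, em) := by
          simp [stepB, show ¬ rm < depth + 1 by omega]
        rw [hsA, hsB]
        have hfrrm : firstReach (PySem.List.enumerate cs 0 ++ [(n, '(')]) 0 rm =
            firstReach (PySem.List.enumerate cs 0) 0 rm := by
          rw [hfr, if_neg (h8 hrm1)]
        refine ⟨rfl, ?_, by simp only; omega, rfl, by simp only; omega, ?_, ?_, ?_, ?_, ?_⟩
        · simp only [List.length_append, List.length_cons, List.length_nil, h2]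
          omega
        · simp only
          rw [hda]
          simp [dstep]
        · simp only
          rw [hfrrm]
          exact h7
        · simp only
          intro _
          rw [hfrrm]
          exact h8 hrm1
        · intro t ht
          simp only at ht
          rw [hfr, if_pos (h9 _ ht), hsing1, if_neg (by omega)]
        · simp only
          rcases h10 with ⟨he, hcont⟩ | ⟨he0, he1, he2, he3⟩
          · exact Or.inl ⟨he, hcont⟩
          · exact Or.inr ⟨he0, he1, by rw [hfr, if_neg he2]; exact he2,
              by rw [hfr, if_neg he2]; exact he3⟩
    · -- c is not '('
      have hsing : ∀ t, firstReach [(n, c)] depth t = -1 := by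
        intro t
        simp only [firstReach, if_neg hc]
        split_ifs <;> rfl
      have hfr3 : ∀ t, firstReach (PySem.List.enumerate cs 0 ++ [(n, c)]) 0 t =
          firstReach (PySem.List.enumerate cs 0) 0 t := by
        intro t
        rw [hfr, hsing]
        split_ifs with h
        · exact h.symm
        · rfl
      have h7' : si = firstReach (PySem.List.enumerate cs 0 ++ [(n, c)]) 0 rm := by
        rw [hfr3]; exact h7
      have h8' : 1 ≤ rm → firstReach (PySem.List.enumerate cs 0 ++ [(n, c)]) 0 rm ≠ -1 := by
        rw [hfr3]; exact h8
      have h9' : ∀ t, rm < t → firstReach (PySem.List.enumerate cs 0 ++ [(n, c)]) 0 t = -1 := by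
        intro t ht; rw [hfr3]; exact h9 t ht
      have h10' : (ei = -1 ∧ content = []) ∨
          (0 ≤ ei ∧ 1 ≤ em ∧ firstReach (PySem.List.enumerate cs 0 ++ [(n, c)]) 0 em ≠ -1 ∧
           content = PySem.List.slice full
             (some (firstReach (PySem.List.enumerate cs 0 ++ [(n, c)]) 0 em + 1)) (some ei)) := by
        rcases h10 with h | ⟨he0, he1, he2, he3⟩
        · exact Or.inl h
        · exact Or.inr ⟨he0, he1, by rw [hfr3]; exact he2, by rw [hfr3]; exact he3⟩
      by_cases hc2 : c = ')'
      · by_cases hd0 : 0 < depth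
        · have hstk : stack ≠ [] := by
            intro h
            rw [h] at h2
            simp at h2
            omega
          have hlendrop : (stack.dropLast).length = (depth - 1).toNat := by
            simp [List.length_dropLast, h2]
          by_cases heq : depth = rm
          · -- this ')' closes from the running maximum: record a new innermost segment
            have hsA : List.foldl (stepA full) (stack, content, md, cd, si) [(n, c)] =
                (stack.dropLast, PySem.List.slice full (some (si + 1)) (some n), md, cd - 1, si) := by
              simp [stepA, hc, hc2, hstk, show cd - 1 = md - 1 by omega]
            have hsB : List.foldl stepB (depth, rm, ei, em) [(n, c)] =
                (depth - 1, rm, n, rm) := by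
              simp [stepB, hc2, heq, show (0:Int) < rm by omega]
            rw [hsA, hsB]
            refine ⟨by simp [h1], hlendrop, by simp only; omega, h4, by simp only; omega, ?_, h7', h8', h9', ?_⟩
            · simp only
              rw [hda]
              simp [dstep, hc, hc2, hd0]
            · simp only
              refine Or.inr ⟨by omega, by omega, ?_, ?_⟩
              · rw [hfr3]
                exact h8 (by omega)
              · rw [h7', hfr3, ← h7]
          · -- ordinary ')'
            have hsA : List.foldl (stepA full) (stack, content, md, cd, si) [(n, c)] =
                (stack.dropLast, content, md, cd - 1, si) := by
              simp [stepA, hc, hc2, hstk, show ¬ cd - 1 = md - 1 by omega]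
            have hsB : List.foldl stepB (depth, rm, ei, em) [(n, c)] =
                (depth - 1, rm, ei, em) := by
              simp [stepB, hc2, hd0, heq]
            rw [hsA, hsB]
            exact ⟨by simp [h1], hlendrop, by simp only; omega, h4, by simp only; omega,
              by rw [hda]; simp [dstep, hc, hc2, hd0], h7', h8', h9', h10'⟩
        · -- unmatched ')': both sides ignore it
          have hstk : stack = [] := by
            have h0 : depth = 0 := by omega
            rw [h0] at h2
            simpa using h2
          have hsA : List.foldl (stepA full) (stack, content, md, cd, si) [(n, c)] =
              (stack, content, md, cd, si) := by
            simp [stepA, hc2, hstk]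
          have hsB : List.foldl stepB (depth, rm, ei, em) [(n, c)] = (depth, rm, ei, em) := by
            simp [stepB, hc2, hd0]
          rw [hsA, hsB]
          exact ⟨h1, h2, h3, h4, h5, by rw [hda]; simp [dstep, hc2, hd0], h7', h8', h9', h10'⟩
      · -- any other character: both sides ignore it
        have hsA : List.foldl (stepA full) (stack, content, md, cd, si) [(n, c)] =
            (stack, content, md, cd, si) := by
          simp [stepA, hc, hc2]
        have hsB : List.foldl stepB (depth, rm, ei, em) [(n, c)] = (depth, rm, ei, em) := by
          simp [stepB, hc, hc2]
        rw [hsA, hsB]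
        exact ⟨h1, h2, h3, h4, h5, by rw [hda]; simp [dstep, hc, hc2], h7', h8', h9', h10'⟩

-- ===== VERDICT (by name: the statement is the Claim_ definition above) =====
theorem extract_innermost_paren_content_spec : Claim_equal_extract_innermost_paren_content := by
  intro expr _
  unfold Spec_extract_innermost_paren_content
  have h := main_inv expr.toList expr.toList
  simp only [extract_innermost_paren_content, extract_innermost_paren_content_alt]
  rcases hA : (PySem.List.enumerate expr.toList 0).foldl (stepA expr.toList) ([], [], 0, 0, -1)
    with ⟨stack, content, md, cd, si⟩
  rcases hB : (PySem.List.enumerate expr.toList 0).foldl stepB (0, 0, -1, 0)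
    with ⟨depth, rm, ei, em⟩
  rw [hA, hB] at h
  simp only [SimInv] at h
  obtain ⟨h1, h2, h3, h4, h5, h6, h7, h8, h9, h10⟩ := h
  rcases h10 with ⟨he, hcont⟩ | ⟨he0, he1, he2, he3⟩
  · rw [hcont, he]
    simp
  · have hnot : ¬ ei < 0 := by omega
    rw [if_neg hnot, he3]
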